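-- pv_equiv track=rewrite | github.com/Shadowz-git/fondamenti1 | eseDomjudge/Lab1Gen.py | cercaBombe
-- ===== SOURCE A (Python) =====
-- def cercaBombe(mat: list) -> bool:
--     lunRighe = len(mat)
--     lunColonne = len(mat[0])
--     contRighe = 0
--     contColonne = 0
--
--     for i in range(lunRighe):
--         rigaAttuale = 0
--         for j in range(lunColonne):
--             if mat[i][j] == 0:
--                 rigaAttuale += 1
--                 contRighe += 1
--                 if rigaAttuale > 1:
--                     return False
--
--     for i in range(lunColonne):
--         colonnaAttuale = 0
--         for j in range(lunRighe):
--             if mat[j][i] == 0: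
--                 colonnaAttuale += 1
--                 contColonne += 1
--                 if colonnaAttuale > 1:
--                     return False
--
--
--     return contRighe == lunRighe and contColonne == lunColonne
-- ===== SOURCE B (Python) =====
-- def cercaBombe(mat: list) -> bool:
--     lunRighe = len(mat)
--     lunColonne = len(mat[0])
--     colCounts = [0] * lunColonne
--     contRighe = 0
--
--     for riga in mat:
--         rigaAttuale = 0
--         for j in range(lunColonne):
--             if riga[j] == 0:
--                 rigaAttuale += 1
--                 contRighe += 1
--                 colCounts[j] += 1
--                 if rigaAttuale > 1:
--                     return False
--
--     contColonne = 0
--     for c in colCounts: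
--         if c > 1:
--             return False
--         contColonne += c
--
--     return contRighe == lunRighe and contColonne == lunColonne
-- ===== Notes on version B (the rewrite author's own statement) =====
-- stated objective: alternative
-- what changed: B replaces A's second, column-major matrix pass by a colCounts table filled during the single row-major pass and swept linearly afterwards, so the matrix is traversed once instead of twice.
-- outside the precondition, e.g. on cercaBombe([[0, 0], [1]]): A returns False, B returns False
import Mathlib
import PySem

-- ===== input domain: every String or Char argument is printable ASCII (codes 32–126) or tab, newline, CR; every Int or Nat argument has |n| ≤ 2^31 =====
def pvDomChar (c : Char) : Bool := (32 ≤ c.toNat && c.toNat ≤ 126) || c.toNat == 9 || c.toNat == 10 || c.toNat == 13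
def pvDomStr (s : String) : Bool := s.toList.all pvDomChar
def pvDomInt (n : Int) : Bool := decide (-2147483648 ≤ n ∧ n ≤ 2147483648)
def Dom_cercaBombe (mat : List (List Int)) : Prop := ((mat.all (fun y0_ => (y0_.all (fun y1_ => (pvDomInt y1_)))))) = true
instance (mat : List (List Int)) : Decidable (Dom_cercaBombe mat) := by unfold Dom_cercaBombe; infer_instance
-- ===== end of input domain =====

-- B replaces A's second (column-major) pass by a colCounts table built during the single
-- row-major pass and swept linearly afterwards; objective: alternative (one traversal instead of two).

-- ===== PORT A =====
-- Each of A's two inner loops is this scan: test each index, count hits in `cur` (the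
-- per-line counter) and `acc` (the running total), early-return False (`none`) when cur > 1.
def pvScanA (f : Int → Bool) (js : List Int) (cur acc : Int) : Option Int :=
  match js with
  | [] => some acc
  | j :: rest =>
    if f j then
      let cur' := cur + 1
      let acc' := acc + 1
      if cur' > 1 then none else pvScanA f rest cur' acc'
    else pvScanA f rest cur acc

-- A's two outer loops: run the inner scan for every i, propagating the early return.
def pvOuterA (f : Int → Int → Bool) (is : List Int) (js : List Int) (acc : Int) : Option Int :=
  match is with
  | [] => some acc
  | i :: rest =>
    match pvScanA (f i) js 0 acc with
    | none => none
    | some acc' => pvOuterA f rest js acc'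

def cercaBombe (mat : List (List Int)) : Bool :=
  let lunRighe : Int := PySem.List.len mat
  let lunColonne : Int := PySem.List.len (PySem.List.pyGetD mat 0 [])
  match pvOuterA (fun i j => PySem.List.pyGetD (PySem.List.pyGetD mat i []) j 1 == 0)
      (PySem.List.pyRange 0 lunRighe 1) (PySem.List.pyRange 0 lunColonne 1) 0 with
  | none => false
  | some contRighe =>
    match pvOuterA (fun i j => PySem.List.pyGetD (PySem.List.pyGetD mat j []) i 1 == 0)
        (PySem.List.pyRange 0 lunColonne 1) (PySem.List.pyRange 0 lunRighe 1) 0 with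
    | none => false
    | some contColonne => (contRighe == lunRighe) && (contColonne == lunColonne)

-- ===== PORT B =====
-- B's inner loop over one row: count zeros in `cur`/`acc`, bump colCounts[j], early return.
def pvInnerB (riga : List Int) (js : List Int) (cur acc : Int) (cc : List Int) :
    Option (Int × List Int) :=
  match js with
  | [] => some (acc, cc)
  | j :: rest =>
    if PySem.List.pyGetD riga j 1 == 0 then
      let cur' := cur + 1
      let acc' := acc + 1
      let cc' := PySem.List.pySetD cc j (PySem.List.pyGetD cc j 0 + 1)
      if cur' > 1 then none else pvInnerB riga rest cur' acc' cc'
    else pvInnerB riga rest cur acc cc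

-- B's single pass over the rows.
def pvRowsB (rows : List (List Int)) (js : List Int) (acc : Int) (cc : List Int) :
    Option (Int × List Int) :=
  match rows with
  | [] => some (acc, cc)
  | r :: rest =>
    match pvInnerB r js 0 acc cc with
    | none => none
    | some (acc', cc') => pvRowsB rest js acc' cc'

-- B's final sweep of colCounts.
def pvSweepB (cc : List Int) (acc : Int) : Option Int :=
  match cc with
  | [] => some acc
  | x :: rest => if x > 1 then none else pvSweepB rest (acc + x)

def cercaBombe_alt (mat : List (List Int)) : Bool :=
  let lunRighe : Int := PySem.List.len mat
  let lunColonne : Int := PySem.List.len (PySem.List.pyGetD mat 0 [])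
  match pvRowsB mat (PySem.List.pyRange 0 lunColonne 1) 0
      (List.replicate (PySem.List.pyGetD mat 0 []).length 0) with
  | none => false
  | some (contRighe, colCounts) =>
    match pvSweepB colCounts 0 with
    | none => false
    | some contColonne => (contRighe == lunRighe) && (contColonne == lunColonne)

-- ===== PRECONDITION & SPEC =====
-- Pre_ excludes the empty matrix and ragged matrices with a row shorter than the first row:
-- on those A raises IndexError, except when a second zero in an earlier row already made it
-- return False — that raggedness corner is excluded wholesale.
def Pre_cercaBombe (mat : List (List Int)) : Prop :=
  mat ≠ [] ∧ ∀ r ∈ mat, (PySem.List.pyGetD mat 0 []).length ≤ r.length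
instance (mat : List (List Int)) : Decidable (Pre_cercaBombe mat) := by
  unfold Pre_cercaBombe; infer_instance

def pvWitness_cercaBombe : List (List Int) := [[0, 1], [1, 0]]

def Spec_cercaBombe (mat : List (List Int)) (out : Bool) : Prop := out = cercaBombe_alt mat
instance (mat : List (List Int)) (out : Bool) : Decidable (Spec_cercaBombe mat out) := by
  unfold Spec_cercaBombe; infer_instance

-- ===== CLAIM (what is proved, stated in full; the proofs are below) =====
def Claim_equal_cercaBombe : Prop :=
  ∀ (mat : List (List Int)), Dom_cercaBombe mat → Pre_cercaBombe mat →
    Spec_cercaBombe mat (cercaBombe mat)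

-- ===== LEMMAS AND PROOFS =====

-- Common normal form of both programs: every row has ≤ 1 zero, every column has ≤ 1 zero,
-- and the row-wise and column-wise zero totals equal the number of rows resp. columns.
def pvSpecFn (mat : List (List Int)) : Bool :=
  let m : Int := PySem.List.len mat
  let c : Int := PySem.List.len (PySem.List.pyGetD mat 0 [])
  let C := PySem.List.pyRange 0 c 1
  if ∀ r ∈ mat, (C.countP (fun j => PySem.List.pyGetD r j 1 == 0) : Int) ≤ 1 then
    if ∀ i ∈ C, (mat.countP (fun r => PySem.List.pyGetD r i 1 == 0) : Int) ≤ 1 then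
      ((mat.map (fun r => (C.countP (fun j => PySem.List.pyGetD r j 1 == 0) : Int))).sum == m)
        && ((C.map (fun i => (mat.countP (fun r => PySem.List.pyGetD r i 1 == 0) : Int))).sum == c)
    else false
  else false

lemma pvScanA_eq (f : Int → Bool) (js : List Int) : ∀ (cur acc : Int), cur ≤ 1 →
    pvScanA f js cur acc =
      if 2 ≤ cur + (js.countP f : Int) then none
      else some (acc + (js.countP f : Int)) := by
  induction js with
  | nil =>
    intro cur acc h
    simp [pvScanA]
    omega
  | cons j rest ih =>
    intro cur acc h
    by_cases hf : f j
    · have hcc : (((j :: rest).countP f : Nat) : Int) = (rest.countP f : Int) + 1 := by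
        rw [List.countP_cons, if_pos hf]
        push_cast
        ring
      rw [hcc]
      by_cases hcur : cur + 1 > 1
      · have hst : pvScanA f (j :: rest) cur acc = none := by
          simp only [pvScanA]
          rw [if_pos hf, if_pos hcur]
        rw [hst, if_pos (by omega)]
      · have hst : pvScanA f (j :: rest) cur acc = pvScanA f rest (cur + 1) (acc + 1) := by
          simp only [pvScanA]
          rw [if_pos hf, if_neg hcur]
        rw [hst, ih (cur + 1) (acc + 1) (by omega)]
        by_cases h2 : 2 ≤ cur + 1 + (rest.countP f : Int)
        · rw [if_pos h2, if_pos (by omega)]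
        · rw [if_neg h2, if_neg (by omega)]
          have harith : acc + 1 + (rest.countP f : Int)
              = acc + ((rest.countP f : Int) + 1) := by ring
          rw [harith]
    · have hcc : (((j :: rest).countP f : Nat) : Int) = (rest.countP f : Int) := by
        rw [List.countP_cons, if_neg hf]
        simp
      rw [hcc]
      have hst : pvScanA f (j :: rest) cur acc = pvScanA f rest cur acc := by
        simp only [pvScanA]
        rw [if_neg hf]
      rw [hst, ih cur acc h]

lemma pvOuterA_eq (f : Int → Int → Bool) (js : List Int) : ∀ (is : List Int) (acc : Int),
    pvOuterA f is js acc =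
      if ∀ i ∈ is, (js.countP (f i) : Int) ≤ 1
      then some (acc + (is.map (fun i => (js.countP (f i) : Int))).sum)
      else none := by
  intro is
  induction is with
  | nil => intro acc; simp [pvOuterA]
  | cons i rest ih =>
    intro acc
    have hst : pvOuterA f (i :: rest) js acc =
        (match pvScanA (f i) js 0 acc with
          | none => none
          | some acc' => pvOuterA f rest js acc') := rfl
    rw [hst, pvScanA_eq (f i) js 0 acc (by omega)]
    by_cases h2 : 2 ≤ (0 : Int) + (js.countP (f i) : Int)
    · have hno : ¬ ∀ i' ∈ i :: rest, ((js.countP (f i') : Int)) ≤ 1 := by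
        intro hall
        have := hall i (List.mem_cons_self ..)
        omega
      rw [if_pos h2, if_neg hno]
    · rw [if_neg h2]
      show pvOuterA f rest js (acc + (js.countP (f i) : Int)) = _
      rw [ih]
      have hle : (js.countP (f i) : Int) ≤ 1 := by omega
      simp only [List.forall_mem_cons, hle, true_and, List.map_cons, List.sum_cons]
      by_cases hrest : ∀ i' ∈ rest, ((js.countP (f i') : Int)) ≤ 1
      · rw [if_pos hrest, if_pos hrest]
        have harith : acc + (js.countP (f i) : Int)
              + (rest.map (fun i' => (js.countP (f i') : Int))).sum
            = acc + ((js.countP (f i) : Int)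
              + (rest.map (fun i' => (js.countP (f i') : Int))).sum) := by ring
        rw [harith]
      · rw [if_neg hrest, if_neg hrest]

lemma pvInnerB_eq (riga : List Int) (js : List Int) :
    ∀ (cur acc : Int) (cc : List Int), cur ≤ 1 → js.Nodup →
      (∀ j ∈ js, 0 ≤ j ∧ j < (cc.length : Int)) →
      (2 ≤ cur + (js.countP (fun j => PySem.List.pyGetD riga j 1 == 0) : Int) →
        pvInnerB riga js cur acc cc = none) ∧
      (cur + (js.countP (fun j => PySem.List.pyGetD riga j 1 == 0) : Int) < 2 →
        ∃ cc', pvInnerB riga js cur acc cc =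
            some (acc + (js.countP (fun j => PySem.List.pyGetD riga j 1 == 0) : Int), cc')
          ∧ cc'.length = cc.length
          ∧ ∀ k : Nat, k < cc.length →
              cc'.getD k 0 = cc.getD k 0 +
                (if (k : Int) ∈ js ∧ PySem.List.pyGetD riga (k : Int) 1 == 0 then 1 else 0)) := by
  induction js with
  | nil =>
    intro cur acc cc h _ _
    constructor
    · intro h2; exfalso; simp at h2; omega
    · intro _
      exact ⟨cc, by simp [pvInnerB], rfl, by intro k hk; simp⟩
  | cons j rest ih =>
    intro cur acc cc h hnd hbd
    obtain ⟨hj0, hjlt⟩ := hbd j (by simp)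
    obtain ⟨n, rfl⟩ : ∃ n : Nat, j = (n : Int) := ⟨j.toNat, (Int.toNat_of_nonneg hj0).symm⟩
    have hnlt : n < cc.length := by exact_mod_cast hjlt
    have hndr : rest.Nodup := (List.nodup_cons.mp hnd).2
    have hnmem : (n : Int) ∉ rest := (List.nodup_cons.mp hnd).1
    by_cases hf : PySem.List.pyGetD riga (n : Int) 1 == 0
    · by_cases hcur : cur + 1 > 1
      · have hst : pvInnerB riga ((n : Int) :: rest) cur acc cc = none := by
          simp only [pvInnerB]
          rw [if_pos hf, if_pos hcur]
        have hcc : ((((n : Int) :: rest).countP (fun j => PySem.List.pyGetD riga j 1 == 0) : Nat) : Int)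
            = (rest.countP (fun j => PySem.List.pyGetD riga j 1 == 0) : Int) + 1 := by
          rw [List.countP_cons, if_pos hf]
          push_cast
          ring
        constructor
        · intro _; exact hst
        · intro hlt; exfalso
          rw [hcc] at hlt
          omega
      · set cc1 := PySem.List.pySetD cc (n : Int) (PySem.List.pyGetD cc (n : Int) 0 + 1) with hcc1
        have hlen1 : cc1.length = cc.length := PySem.List.length_pySetD cc _ _
        have hcc : ((((n : Int) :: rest).countP (fun j => PySem.List.pyGetD riga j 1 == 0) : Nat) : Int)
            = (rest.countP (fun j => PySem.List.pyGetD riga j 1 == 0) : Int) + 1 := by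
          rw [List.countP_cons, if_pos hf]
          push_cast
          ring
        have hst : pvInnerB riga ((n : Int) :: rest) cur acc cc =
            pvInnerB riga rest (cur + 1) (acc + 1) cc1 := by
          simp only [pvInnerB]
          rw [if_pos hf, if_neg hcur, ← hcc1]
        have hbd1 : ∀ j ∈ rest, 0 ≤ j ∧ j < (cc1.length : Int) := by
          intro j hj; rw [hlen1]; exact hbd j (by simp [hj])
        obtain ⟨ih1, ih2⟩ := ih (cur + 1) (acc + 1) cc1 (by omega) hndr hbd1
        have hgetD1 : ∀ k : Nat, k < cc.length →
            cc1.getD k 0 = if k = n then cc.getD n 0 + 1 else cc.getD k 0 := by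
          intro k hk
          rw [hcc1]
          have hps := PySem.List.pyGetD_pySetD_natCast cc n k
            (PySem.List.pyGetD cc (n : Int) 0 + 1) 0 hnlt
          simpa [PySem.List.pyGetD_natCast] using hps
        constructor
        · intro h2
          rw [hst]
          apply ih1
          rw [hcc] at h2
          omega
        · intro hlt
          rw [hcc] at hlt
          obtain ⟨cc2, heq, hlen2, hpt⟩ := ih2 (by omega)
          refine ⟨cc2, ?_, by rw [hlen2, hlen1], ?_⟩
          · rw [hcc, hst, heq]
            have harith : acc + 1 + (rest.countP (fun j => PySem.List.pyGetD riga j 1 == 0) : Int)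
                = acc + ((rest.countP (fun j => PySem.List.pyGetD riga j 1 == 0) : Int) + 1) := by
              ring
            rw [harith]
          · intro k hk
            have hk1 : k < cc1.length := by rw [hlen1]; exact hk
            rw [hpt k hk1, hgetD1 k hk]
            by_cases hkn : k = n
            · subst hkn
              simp [List.mem_cons, hnmem]
              simpa using hf
            · rw [if_neg hkn]
              have hmem_iff : ((k : Int) ∈ (n : Int) :: rest) ↔ ((k : Int) ∈ rest) := by
                simp only [List.mem_cons]
                constructor
                · rintro (he | hm)
                  · exfalso; exact hkn (by exact_mod_cast he)
                  · exact hm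
                · intro hm; exact Or.inr hm
              by_cases hin : (k : Int) ∈ rest ∧ PySem.List.pyGetD riga (k : Int) 1 == 0
              · rw [if_pos hin, if_pos ⟨hmem_iff.mpr hin.1, hin.2⟩]
              · rw [if_neg hin, if_neg (by intro ⟨hm, hz⟩; exact hin ⟨hmem_iff.mp hm, hz⟩)]
    · have hst : pvInnerB riga ((n : Int) :: rest) cur acc cc =
          pvInnerB riga rest cur acc cc := by
        simp only [pvInnerB]
        rw [if_neg hf]
      obtain ⟨ih1, ih2⟩ := ih cur acc cc h hndr (fun j hj => hbd j (by simp [hj]))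
      have hcnt : (((n : Int) :: rest).countP (fun j => PySem.List.pyGetD riga j 1 == 0))
          = rest.countP (fun j => PySem.List.pyGetD riga j 1 == 0) := by
        rw [List.countP_cons, if_neg hf, add_zero]
      constructor
      · intro h2; rw [hst]; apply ih1; rw [hcnt] at h2; exact h2
      · intro hlt
        rw [hcnt] at hlt ⊢
        obtain ⟨cc', heq, hlen, hpt⟩ := ih2 hlt
        refine ⟨cc', by rw [hst]; exact heq, hlen, ?_⟩
        intro k hk
        rw [hpt k hk]
        by_cases hkn : k = n
        · subst hkn
          have h1 : ¬ ((k : Int) ∈ rest ∧ PySem.List.pyGetD riga (k : Int) 1 == 0) := by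
            intro ⟨_, hz⟩; exact hf hz
          have h2 : ¬ ((k : Int) ∈ (k : Int) :: rest ∧ PySem.List.pyGetD riga (k : Int) 1 == 0) := by
            intro ⟨_, hz⟩; exact hf hz
          rw [if_neg h1, if_neg h2]
        · have hmem_iff : ((k : Int) ∈ (n : Int) :: rest) ↔ ((k : Int) ∈ rest) := by
            simp only [List.mem_cons]
            constructor
            · rintro (he | hm)
              · exfalso; exact hkn (by exact_mod_cast he)
              · exact hm
            · intro hm; exact Or.inr hm
          by_cases hin : (k : Int) ∈ rest ∧ PySem.List.pyGetD riga (k : Int) 1 == 0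
          · rw [if_pos hin, if_pos ⟨hmem_iff.mpr hin.1, hin.2⟩]
          · rw [if_neg hin, if_neg (by intro ⟨hm, hz⟩; exact hin ⟨hmem_iff.mp hm, hz⟩)]

lemma pvRowsB_eq (js : List Int) (hnd : js.Nodup) :
    ∀ (rows : List (List Int)) (acc : Int) (cc : List Int),
      (∀ j ∈ js, 0 ≤ j ∧ j < (cc.length : Int)) →
      ((∃ r ∈ rows, 2 ≤ (js.countP (fun j => PySem.List.pyGetD r j 1 == 0) : Int)) →
        pvRowsB rows js acc cc = none) ∧
      ((∀ r ∈ rows, (js.countP (fun j => PySem.List.pyGetD r j 1 == 0) : Int) ≤ 1) →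
        ∃ cc', pvRowsB rows js acc cc =
            some (acc + (rows.map (fun r =>
              (js.countP (fun j => PySem.List.pyGetD r j 1 == 0) : Int))).sum, cc')
          ∧ cc'.length = cc.length
          ∧ ∀ k : Nat, k < cc.length →
              cc'.getD k 0 = cc.getD k 0 +
                (if (k : Int) ∈ js
                  then (rows.countP (fun r => PySem.List.pyGetD r (k : Int) 1 == 0) : Int)
                  else 0)) := by
  intro rows
  induction rows with
  | nil =>
    intro acc cc _
    constructor
    · rintro ⟨r, hr, -⟩; exact absurd hr (List.not_mem_nil)
    · intro _
      exact ⟨cc, by simp [pvRowsB], rfl, by intro k hk; simp⟩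
  | cons r rows ih =>
    intro acc cc hbd
    by_cases hr : 2 ≤ (js.countP (fun j => PySem.List.pyGetD r j 1 == 0) : Int)
    · have hno : pvInnerB r js 0 acc cc = none :=
        (pvInnerB_eq r js 0 acc cc (by omega) hnd hbd).1 (by omega)
      have hst : pvRowsB (r :: rows) js acc cc = none := by
        simp [pvRowsB, hno]
      constructor
      · intro _; exact hst
      · intro hall; exfalso
        have := hall r (by simp)
        omega
    · obtain ⟨cc1, heq1, hlen1, hpt1⟩ :=
        (pvInnerB_eq r js 0 acc cc (by omega) hnd hbd).2 (by omega)
      have hst : pvRowsB (r :: rows) js acc cc =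
          pvRowsB rows js (acc + (js.countP (fun j => PySem.List.pyGetD r j 1 == 0) : Int)) cc1 := by
        simp [pvRowsB, heq1]
      obtain ⟨ih1, ih2⟩ := ih (acc + (js.countP (fun j => PySem.List.pyGetD r j 1 == 0) : Int)) cc1
        (by intro j hj; rw [hlen1]; exact hbd j hj)
      constructor
      · rintro ⟨r', hr', hbad⟩
        rw [hst]
        apply ih1
        refine ⟨r', ?_, hbad⟩
        rcases List.mem_cons.mp hr' with he | hm
        · exfalso; subst he; omega
        · exact hm
      · intro hall
        obtain ⟨cc2, heq2, hlen2, hpt2⟩ := ih2 (fun r' hr' => hall r' (by simp [hr']))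
        refine ⟨cc2, ?_, by rw [hlen2, hlen1], ?_⟩
        · rw [hst, heq2, List.map_cons, List.sum_cons, ← add_assoc]
        · intro k hk
          have hk1 : k < cc1.length := by rw [hlen1]; exact hk
          rw [hpt2 k hk1, hpt1 k hk]
          by_cases hin : (k : Int) ∈ js
          · simp only [hin, true_and, List.countP_cons]
            by_cases hz : PySem.List.pyGetD r (k : Int) 1 == 0
            · rw [if_pos hz]
              simp only [hz, if_pos]
              push_cast
              ring
            · rw [if_neg hz]
              simp only [hz, Bool.false_eq_true, if_false]
              push_cast
              ring
          · simp only [hin, false_and, if_false]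
            ring

lemma pvSweepB_eq (cc : List Int) : ∀ (acc : Int),
    pvSweepB cc acc = if ∀ x ∈ cc, x ≤ 1 then some (acc + cc.sum) else none := by
  induction cc with
  | nil => intro acc; simp [pvSweepB]
  | cons x rest ih =>
    intro acc
    by_cases hx : x > 1
    · have hst : pvSweepB (x :: rest) acc = none := by simp [pvSweepB, hx]
      rw [hst, if_neg]
      intro hall
      have := hall x (by simp)
      omega
    · have hst : pvSweepB (x :: rest) acc = pvSweepB rest (acc + x) := by
        simp [pvSweepB, hx]
      rw [hst, ih (acc + x)]
      simp only [List.forall_mem_cons, List.sum_cons,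
        show x ≤ 1 from by omega, true_and]
      split_ifs with hrest
      · simp only [Option.some.injEq]; ring
      · rfl

-- A's port reduces to the common normal form.
lemma cercaBombe_to_spec (mat : List (List Int)) : cercaBombe mat = pvSpecFn mat := by
  simp only [cercaBombe, pvSpecFn]
  rw [pvOuterA_eq, pvOuterA_eq]
  set C : List Int := PySem.List.pyRange 0 (PySem.List.len (PySem.List.pyGetD mat 0 [])) 1 with hC
  have hmap : (PySem.List.pyRange 0 (PySem.List.len mat) 1).map
      (fun i => PySem.List.pyGetD mat i []) = mat :=
    PySem.List.map_pyGetD_pyRange_zero mat []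
  have hc1 : (∀ i ∈ PySem.List.pyRange 0 (PySem.List.len mat) 1,
        (C.countP (fun j => PySem.List.pyGetD (PySem.List.pyGetD mat i []) j 1 == 0) : Int) ≤ 1)
      ↔ (∀ r ∈ mat, (C.countP (fun j => PySem.List.pyGetD r j 1 == 0) : Int) ≤ 1) := by
    conv_rhs => rw [← hmap]
    rw [List.forall_mem_map]
  have hs1 : (PySem.List.pyRange 0 (PySem.List.len mat) 1).map
        (fun i => (C.countP (fun j => PySem.List.pyGetD (PySem.List.pyGetD mat i []) j 1 == 0) : Int))
      = mat.map (fun r => (C.countP (fun j => PySem.List.pyGetD r j 1 == 0) : Int)) := by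
    conv_rhs => rw [← hmap]
    rw [List.map_map]
    rfl
  have hc2 : ∀ i : Int,
      ((PySem.List.pyRange 0 (PySem.List.len mat) 1).countP
        (fun j => PySem.List.pyGetD (PySem.List.pyGetD mat j []) i 1 == 0) : Int)
      = (mat.countP (fun r => PySem.List.pyGetD r i 1 == 0) : Int) := by
    intro i
    conv_rhs => rw [← hmap]
    rw [List.countP_map]
    rfl
  simp only [hc1, hs1, hc2]
  by_cases h1 : ∀ r ∈ mat, (C.countP (fun j => PySem.List.pyGetD r j 1 == 0) : Int) ≤ 1
  · rw [if_pos h1, if_pos h1]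
    by_cases h2 : ∀ i ∈ C, (mat.countP (fun r => PySem.List.pyGetD r i 1 == 0) : Int) ≤ 1
    · rw [if_pos h2, if_pos h2]
      simp only [zero_add]
    · rw [if_neg h2, if_neg h2]
  · rw [if_neg h1, if_neg h1]

-- B's port reduces to the common normal form.
lemma cercaBombe_alt_to_spec (mat : List (List Int)) : cercaBombe_alt mat = pvSpecFn mat := by
  simp only [cercaBombe_alt, pvSpecFn]
  set c : Nat := (PySem.List.pyGetD mat 0 []).length with hc
  have hlenC : PySem.List.len (PySem.List.pyGetD mat 0 []) = (c : Int) := rfl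
  set C : List Int := PySem.List.pyRange 0 (PySem.List.len (PySem.List.pyGetD mat 0 [])) 1 with hC
  have hCnat : C = (List.range c).map (fun k : Nat => (k : Int)) := by
    rw [hC, hlenC]
    exact PySem.List.pyRange_zero_nat c
  have hbd : ∀ j ∈ C, 0 ≤ j ∧ j < ((List.replicate c (0 : Int)).length : Int) := by
    intro j hj
    rw [hC, hlenC] at hj
    have := PySem.List.mem_pyRange_one.mp hj
    simp only [List.length_replicate]
    exact this
  obtain ⟨hb1, hb2⟩ := pvRowsB_eq C (by rw [hC]; exact PySem.List.nodup_pyRange_one 0 _)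
    mat 0 (List.replicate c 0) hbd
  by_cases hrows : ∀ r ∈ mat, (C.countP (fun j => PySem.List.pyGetD r j 1 == 0) : Int) ≤ 1
  · obtain ⟨cc', heq, hlen, hpt⟩ := hb2 hrows
    have hlen' : cc'.length = c := by rw [hlen, List.length_replicate]
    -- cc' is exactly the list of column zero-counts
    have hccval : cc' = (List.range c).map
        (fun k : Nat => (mat.countP (fun r => PySem.List.pyGetD r (k : Int) 1 == 0) : Int)) := by
      apply List.ext_getElem
      · rw [hlen', List.length_map, List.length_range]
      · intro k hk1 hk2
        have hkc : k < c := by rw [hlen'] at hk1; exact hk1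
        have hmem : (k : Int) ∈ C := by
          rw [hC, hlenC]
          exact PySem.List.mem_pyRange_one.mpr ⟨by positivity, by exact_mod_cast hkc⟩
        have hgd := hpt k (by rw [List.length_replicate]; exact hkc)
        rw [List.getD_eq_getElem cc' 0 hk1] at hgd
        rw [hgd]
        simp [hkc, if_pos hmem]
    rw [heq]
    simp only []
    rw [pvSweepB_eq]
    have hcond : (∀ x ∈ cc', x ≤ 1) ↔
        (∀ i ∈ C, (mat.countP (fun r => PySem.List.pyGetD r i 1 == 0) : Int) ≤ 1) := by
      rw [hccval, hCnat, List.forall_mem_map, List.forall_mem_map]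
    have hsum : cc'.sum = (C.map
        (fun i => (mat.countP (fun r => PySem.List.pyGetD r i 1 == 0) : Int))).sum := by
      rw [hccval, hCnat, List.map_map]
      rfl
    rw [if_pos hrows]
    by_cases h2 : ∀ i ∈ C, ((mat.countP (fun r => PySem.List.pyGetD r i 1 == 0) : Int)) ≤ 1
    · rw [if_pos (hcond.mpr h2), if_pos h2]
      simp [hsum]
    · rw [if_neg (fun hx => h2 (hcond.mp hx)), if_neg h2]
  · rw [if_neg hrows]
    push_neg at hrows
    obtain ⟨r, hrm, hbad⟩ := hrows
    rw [hb1 ⟨r, hrm, by omega⟩]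

-- ===== VERDICT (by name: the statement is the Claim_ definition above) =====
theorem cercaBombe_spec : Claim_equal_cercaBombe := by
  intro mat _hdom _hpre
  unfold Spec_cercaBombe
  rw [cercaBombe_to_spec, cercaBombe_alt_to_spec]
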